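-- pv_equiv track=rewrite | github.com/Gyusik-Choi/algorithm | programmers/프로세스/프로세스.py | solution
-- ===== SOURCE A (Python) =====
-- from collections import deque
--
-- def get_max_priority(priorities):
--     max_priority = 0
--
--     for idx, priority in priorities:
--         max_priority = max(max_priority, priority)
--
--     return max_priority
--
-- def solution(priorities, location):
--     priorities = deque([idx, priority] for idx, priority in enumerate(priorities))
--     max_priority = get_max_priority(priorities)
--     order = 0
--
--     while priorities:
--         i, p = priorities.popleft()
--
--         # 대상 프로세스
--         if i == location:
--             # 가장 높은 우선 순위일 경우
--             if p == max_priority: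
--                 # 실행 시키고 종료
--                 order += 1
--                 break
--             # 가장 높은 우선 순위가 아닐 경우
--             else:
--                 # 꺼낸 프로세스를 다시 큐에 넣는다
--                 priorities.append([i, p])
--         # 대상 프로세스 아닐 때
--         else:
--             # 가장 높은 우선 순위일 경우
--             if p == max_priority:
--                 # 실행 시키고 우선 순위 갱신
--                 order += 1
--                 max_priority = get_max_priority(priorities)
--             # 가장 높은 우선 순위가 아닐 경우
--             else:
--                 # 꺼낸 프로세스를 다시 큐에 넣는다
--                 priorities.append([i, p])
--
--     return order
-- ===== SOURCE B (Python) =====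
-- def solution(priorities, location):
--     # group indices by priority, then walk priority levels in descending order;
--     # within a level, processes run in cyclic index order starting at the cursor
--     # (one past the previously executed index)
--     groups = {}
--     for i, p in enumerate(priorities):
--         groups.setdefault(p, []).append(i)
--     cursor = 0
--     order = 0
--     for p in sorted(groups, reverse=True):
--         idxs = groups[p]
--         seq = [i for i in idxs if i >= cursor] + [i for i in idxs if i < cursor]
--         for i in seq:
--             order += 1
--             if i == location:
--                 return order
--             cursor = i + 1
--     return order
-- ===== Notes on version B (the rewrite author's own statement) =====
-- stated objective: faster
-- what changed: B replaces A's deque simulation (popping each process and re-appending it until the maximum priority comes around) by grouping indices per priority in a dict and walking the priority levels in descending sorted order with a cyclic cursor.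
import Mathlib
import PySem

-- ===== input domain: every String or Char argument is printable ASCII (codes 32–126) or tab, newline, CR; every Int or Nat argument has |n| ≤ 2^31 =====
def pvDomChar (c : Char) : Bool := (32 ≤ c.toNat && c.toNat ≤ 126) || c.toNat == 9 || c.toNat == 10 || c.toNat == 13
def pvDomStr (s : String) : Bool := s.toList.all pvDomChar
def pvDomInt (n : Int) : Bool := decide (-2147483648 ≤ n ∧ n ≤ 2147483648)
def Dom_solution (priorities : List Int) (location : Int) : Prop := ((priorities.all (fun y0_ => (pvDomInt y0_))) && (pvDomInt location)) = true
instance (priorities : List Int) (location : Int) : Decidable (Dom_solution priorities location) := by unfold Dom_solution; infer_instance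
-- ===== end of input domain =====

-- B replaces A's queue simulation by grouping indices per priority and walking the
-- priority levels in descending order with a cyclic cursor (O(n log n) instead of simulation).

-- ===== PORT A =====
-- get_max_priority: running max starting from 0 (hence A loops forever once only
-- negative priorities remain; Pre_ excludes exactly those inputs)
def solGetMax (priorities : List (Int × Int)) : Int :=
  priorities.foldl (fun m e => max m e.2) 0

-- the while loop; fuel (n+1)^2 is proved sufficient on every input admitted by Pre_
def solLoop : Nat → List (Int × Int) → Int → Int → Int → Int
  | _, [], _, order, _ => order
  | 0, _ :: _, _, order, _ => order
  | fuel+1, (i, p) :: rest, maxp, order, location =>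
    if i = location then
      if p = maxp then order + 1
      else solLoop fuel (rest ++ [(i, p)]) maxp order location
    else
      if p = maxp then solLoop fuel rest (solGetMax rest) (order + 1) location
      else solLoop fuel (rest ++ [(i, p)]) maxp order location

def solution (priorities : List Int) (location : Int) : Int :=
  let q := PySem.List.enumerate priorities
  solLoop ((q.length + 1) * (q.length + 1)) q (solGetMax q) 0 location

-- ===== PORT B =====
-- inner 'for i in seq' loop: (found result?, order, cursor)
def altInner : List Int → Int → Int → Int → Option Int × Int × Int
  | [], _, order, cursor => (none, order, cursor)
  | i :: rest, location, order, cursor =>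
    if i = location then (some (order + 1), order + 1, i + 1)
    else altInner rest location (order + 1) (i + 1)

-- 'for p in sorted(groups, reverse=True)' loop
def altLevels : List Int → PySem.Dict Int (List Int) → Int → Int → Int → Int
  | [], _, _, order, _ => order
  | p :: ps, groups, cursor, order, location =>
    let idxs := groups.getD p []
    let seq := idxs.filter (fun i => decide (cursor ≤ i)) ++ idxs.filter (fun i => decide (i < cursor))
    match altInner seq location order cursor with
    | (some r, _, _) => r
    | (none, order', cursor') => altLevels ps groups cursor' order' location

def solution_alt (priorities : List Int) (location : Int) : Int :=
  let groups := (PySem.List.enumerate priorities).foldl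
      (fun d e => d.modify e.2 [] (fun l => l ++ [e.1])) PySem.Dict.empty
  let keys := PySem.List.sorted groups.keys (fun k => k) true
  altLevels keys groups 0 0 location

-- ===== PRECONDITION & SPEC =====
-- Pre_ excludes exactly the inputs on which A never returns (infinite loop): those where
-- some priority is negative and the process at `location` does not have a nonnegative
-- priority — A's helper computes max(0, ...) so once only negative priorities remain
-- nothing ever matches it and the queue cycles forever.
def Pre_solution (priorities : List Int) (location : Int) : Prop :=
  (∀ p ∈ priorities, 0 ≤ p) ∨
  (0 ≤ location ∧ location.toNat < priorities.length ∧ 0 ≤ priorities.getD location.toNat 0)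
instance (priorities : List Int) (location : Int) : Decidable (Pre_solution priorities location) := by
  unfold Pre_solution; infer_instance

def pvWitness_solution : List Int × Int := ([2, 1, 3, 2], 2)

def Spec_solution (priorities : List Int) (location : Int) (out : Int) : Prop := out = solution_alt priorities location
instance (priorities : List Int) (location : Int) (out : Int) : Decidable (Spec_solution priorities location out) := by unfold Spec_solution; infer_instance

-- ===== CLAIM (what is proved, stated in full; the proofs are below) =====
def Claim_equal_solution : Prop := ∀ (priorities : List Int) (location : Int), Dom_solution priorities location → Pre_solution priorities location → Spec_solution priorities location (solution priorities location)

-- ===== LEMMAS AND PROOFS =====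

-- ---- generic facts about the running max ----
theorem foldlMax_acc_le (q : List (Int × Int)) : ∀ a : Int, a ≤ q.foldl (fun m e => max m e.2) a := by
  induction q with
  | nil => intro a; simp [List.foldl]
  | cons h t ih =>
    intro a
    exact le_trans (le_max_left a h.2) (ih (max a h.2))

theorem mem_le_foldlMax (q : List (Int × Int)) : ∀ (a : Int) (e : Int × Int), e ∈ q → e.2 ≤ q.foldl (fun m e => max m e.2) a := by
  induction q with
  | nil => intro a e he; cases he
  | cons h t ih =>
    intro a e he
    rcases List.mem_cons.mp he with rfl | he'
    · exact le_trans (le_max_right a e.2) (foldlMax_acc_le t (max a e.2))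
    · exact ih (max a h.2) e he'

theorem foldlMax_le (q : List (Int × Int)) : ∀ (a b : Int), a ≤ b → (∀ e ∈ q, e.2 ≤ b) → q.foldl (fun m e => max m e.2) a ≤ b := by
  induction q with
  | nil => intro a b hab _; simpa [List.foldl] using hab
  | cons h t ih =>
    intro a b hab hall
    exact ih (max a h.2) b (max_le hab (hall h (List.mem_cons_self))) fun e he => hall e (List.mem_cons_of_mem _ he)

theorem foldlMax_cases (q : List (Int × Int)) : ∀ a : Int, q.foldl (fun m e => max m e.2) a = a ∨ ∃ e ∈ q, q.foldl (fun m e => max m e.2) a = e.2 := by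
  induction q with
  | nil => intro a; left; rfl
  | cons h t ih =>
    intro a
    rcases ih (max a h.2) with heq | ⟨e, he, heq⟩
    · rcases max_choice a h.2 with hm | hm
      · left; simp only [List.foldl]; rw [heq, hm]
      · right; exact ⟨h, List.mem_cons_self, by simp only [List.foldl]; rw [heq, hm]⟩
    · right; exact ⟨e, List.mem_cons_of_mem _ he, heq⟩

theorem le_solGetMax (q : List (Int × Int)) (e : Int × Int) (he : e ∈ q) : e.2 ≤ solGetMax q :=
  mem_le_foldlMax q 0 e he

theorem solGetMax_le (q : List (Int × Int)) (b : Int) (hb : 0 ≤ b) (h : ∀ e ∈ q, e.2 ≤ b) : solGetMax q ≤ b :=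
  foldlMax_le q 0 b hb h

theorem exists_solGetMax_mem (q : List (Int × Int)) (h : ∃ e ∈ q, 0 ≤ e.2) : ∃ e ∈ q, e.2 = solGetMax q := by
  rcases foldlMax_cases q 0 with h0 | ⟨e, he, heq⟩
  · rcases h with ⟨e0, he0, hnn⟩
    refine ⟨e0, he0, le_antisymm (le_solGetMax q e0 he0) ?_⟩
    rw [solGetMax] at *; omega
  · exact ⟨e, he, heq.symm⟩

theorem foldlMax_max_out (q : List (Int × Int)) : ∀ a b : Int, q.foldl (fun m e => max m e.2) (max a b) = max (q.foldl (fun m e => max m e.2) a) b := by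
  induction q with
  | nil => intro a b; rfl
  | cons h t ih =>
    intro a b
    simp only [List.foldl]
    rw [max_right_comm a b h.2, ih]

theorem solGetMax_rotate (h : Int × Int) (rest : List (Int × Int)) : solGetMax (rest ++ [h]) = solGetMax (h :: rest) := by
  show (rest ++ [h]).foldl (fun m e => max m e.2) 0 = _
  rw [List.foldl_append]
  show max (rest.foldl (fun m e => max m e.2) 0) h.2 = rest.foldl (fun m e => max m e.2) (max 0 h.2)
  rw [foldlMax_max_out]

-- ---- takeWhile / dropWhile over an append containing a stop ----
theorem dropWhile_append_of_stop {α : Type} (p : α → Bool) (l1 l2 : List α) (h : ∃ x ∈ l1, p x = false) :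
    (l1 ++ l2).dropWhile p = l1.dropWhile p ++ l2 := by
  induction l1 with
  | nil => rcases h with ⟨x, hx, _⟩; cases hx
  | cons a t ih =>
    by_cases hp : p a = true
    · simp only [List.cons_append, List.dropWhile_cons, hp, if_true]
      apply ih
      rcases h with ⟨x, hx, hxf⟩
      rcases List.mem_cons.mp hx with rfl | hxt
      · rw [hp] at hxf; cases hxf
      · exact ⟨x, hxt, hxf⟩
    · simp only [List.cons_append, List.dropWhile_cons, hp]; simp at hp; simp [hp]

theorem takeWhile_append_of_stop {α : Type} (p : α → Bool) (l1 l2 : List α) (h : ∃ x ∈ l1, p x = false) :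
    (l1 ++ l2).takeWhile p = l1.takeWhile p := by
  induction l1 with
  | nil => rcases h with ⟨x, hx, _⟩; cases hx
  | cons a t ih =>
    by_cases hp : p a = true
    · simp only [List.cons_append, List.takeWhile_cons, hp, if_true]
      congr 1
      apply ih
      rcases h with ⟨x, hx, hxf⟩
      rcases List.mem_cons.mp hx with rfl | hxt
      · rw [hp] at hxf; cases hxf
      · exact ⟨x, hxt, hxf⟩
    · simp only [List.cons_append, List.takeWhile_cons, hp]; simp at hp; simp [hp]

-- ---- S: the abstract "jump to the first maximal process" execution ----
def specS : Nat → List (Int × Int) → Int → Int → Int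
  | 0, _, _, order => order
  | fuel+1, q, loc, order =>
    match q.dropWhile (fun e => decide (e.2 ≠ solGetMax q)) with
    | [] => order
    | e :: after =>
      if e.1 = loc then order + 1
      else specS fuel (after ++ q.takeWhile (fun e => decide (e.2 ≠ solGetMax q))) loc (order + 1)

-- rotating a non-maximal head to the back does not change specS
theorem specS_rotate (h : Int × Int) (rest : List (Int × Int)) (loc order : Int)
    (hne : h.2 ≠ solGetMax (h :: rest)) (hex : ∃ e ∈ rest, e.2 = solGetMax (h :: rest)) :
    specS (rest ++ [h]).length (rest ++ [h]) loc order = specS (h :: rest).length (h :: rest) loc order := by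
  set m := solGetMax (h :: rest) with hm
  have hrot : solGetMax (rest ++ [h]) = m := solGetMax_rotate h rest
  set pred : Int × Int → Bool := fun e => decide (e.2 ≠ m) with hpred
  have hstop : ∃ x ∈ rest, pred x = false := by
    rcases hex with ⟨e, he, heq⟩
    exact ⟨e, he, by simp [hpred, heq]⟩
  -- rest.dropWhile pred is nonempty
  have hdnil : rest.dropWhile pred ≠ [] := by
    intro hnil
    rcases hstop with ⟨x, hx, hxf⟩
    have : rest.takeWhile pred = rest := by
      have := List.takeWhile_append_dropWhile (p := pred) (l := rest)
      rwa [hnil, List.append_nil] at this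
    have : pred x = true := List.mem_takeWhile_imp (by rwa [this])
    rw [hxf] at this; cases this
  obtain ⟨d0, a, hda⟩ := List.exists_cons_of_ne_nil hdnil
  have hpredh : pred h = true := by simp [hpred, hne]
  have hdrop1 : (h :: rest).dropWhile pred = d0 :: a := by
    rw [List.dropWhile_cons_of_pos hpredh, hda]
  have htake1 : (h :: rest).takeWhile pred = h :: rest.takeWhile pred := by
    rw [List.takeWhile_cons_of_pos hpredh]
  have hdrop2 : (rest ++ [h]).dropWhile pred = d0 :: (a ++ [h]) := by
    rw [dropWhile_append_of_stop pred rest [h] hstop, hda]; simp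
  have htake2 : (rest ++ [h]).takeWhile pred = rest.takeWhile pred := by
    rw [takeWhile_append_of_stop pred rest [h] hstop]
  have hlen : (rest ++ [h]).length = rest.length + 1 := by simp
  have hlen2 : (h :: rest).length = rest.length + 1 := by simp
  rw [hlen, hlen2]
  show specS (rest.length + 1) (rest ++ [h]) loc order = specS (rest.length + 1) (h :: rest) loc order
  simp only [specS]
  rw [hrot, ← hm]
  rw [← hpred, hdrop1, hdrop2, htake1, htake2]
  simp only []
  by_cases hd0 : d0.1 = loc
  · simp [hd0]
  · simp only [hd0, if_false]
    have : (a ++ [h]) ++ rest.takeWhile pred = a ++ (h :: rest.takeWhile pred) := by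
      simp
    rw [this]

-- ---- L1: A's loop equals specS ----
def invA (loc : Int) (q : List (Int × Int)) : Prop :=
  (∀ e ∈ q, 0 ≤ e.2) ∨ ∃ p, (loc, p) ∈ q ∧ 0 ≤ p

def distMax (q : List (Int × Int)) : Nat :=
  (q.takeWhile (fun e => decide (e.2 ≠ solGetMax q))).length

theorem loop_eq_specS (loc : Int) : ∀ (fuel : Nat) (q : List (Int × Int)) (order : Int),
    invA loc q → q.length * q.length + distMax q ≤ fuel →
    solLoop fuel q (solGetMax q) order loc = specS q.length q loc order := by
  intro fuel
  induction fuel with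
  | zero =>
    intro q order hinv hle
    cases q with
    | nil => rfl
    | cons hd rest =>
      exfalso
      have : (hd :: rest).length * (hd :: rest).length ≥ 1 := by
        have : (hd :: rest).length ≥ 1 := by simp
        nlinarith
      omega
  | succ f ih =>
    intro q order hinv hle
    cases q with
    | nil => rfl
    | cons hd rest =>
      set m := solGetMax (hd :: rest) with hm
      set pred : Int × Int → Bool := fun e => decide (e.2 ≠ m) with hpred
      have hmax_mem : ∃ e ∈ hd :: rest, e.2 = m := by
        apply exists_solGetMax_mem
        rcases hinv with hall | ⟨p, hp, hnn⟩
        · exact ⟨hd, List.mem_cons_self, hall hd List.mem_cons_self⟩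
        · exact ⟨(loc, p), hp, hnn⟩
      obtain ⟨i, p⟩ := hd
      by_cases hp2 : p = m
      · -- head is maximal: one execution step
        have hpredhd : pred (i, p) = false := by simp [hpred, hp2]
        have hdrop : ((i, p) :: rest).dropWhile pred = (i, p) :: rest :=
          List.dropWhile_cons_of_neg (by simp [hpredhd])
        have htake : ((i, p) :: rest).takeWhile pred = [] :=
          List.takeWhile_cons_of_neg (by simp [hpredhd])
        have hspec : specS ((i, p) :: rest).length ((i, p) :: rest) loc order =
            if i = loc then order + 1 else specS rest.length rest loc (order + 1) := by
          have : ((i, p) :: rest).length = rest.length + 1 := by simp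
          rw [this]
          simp only [specS]
          rw [← hm, ← hpred, hdrop, htake]
          simp only [List.append_nil]
        rw [hspec]
        by_cases hi : i = loc
        · simp only [solLoop, hi, if_true, hp2, ← hm]
        · simp only [solLoop, hi, if_false, hp2, ← hm]
          simp only [if_true]
          have hinv' : invA loc rest := by
            rcases hinv with hall | ⟨pp, hpp, hnn⟩
            · exact Or.inl fun e he => hall e (List.mem_cons_of_mem _ he)
            · refine Or.inr ⟨pp, ?_, hnn⟩
              rcases List.mem_cons.mp hpp with heq | hmem
              · exact absurd (congrArg Prod.fst heq).symm hi
              · exact hmem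
          have hb : rest.length * rest.length + distMax rest ≤ f := by
            have h1 : distMax rest ≤ rest.length := (List.takeWhile_sublist _).length_le
            have h2 : ((i, p) :: rest).length = rest.length + 1 := by simp
            rw [h2] at hle
            nlinarith
          exact ih rest (order + 1) hinv' hb
      · -- head is not maximal: rotate it to the back
        have hstep : solLoop (f + 1) ((i, p) :: rest) m order loc =
            solLoop f (rest ++ [(i, p)]) m order loc := by
          by_cases hi : i = loc
          · simp [solLoop, hi, hp2]
          · simp [solLoop, hi, hp2]
        rw [hstep]
        have hex_rest : ∃ e ∈ rest, e.2 = m := by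
          rcases hmax_mem with ⟨e, he, heq⟩
          rcases List.mem_cons.mp he with rfl | hmem
          · exact absurd heq hp2
          · exact ⟨e, hmem, heq⟩
        have hrot : solGetMax (rest ++ [(i, p)]) = m := solGetMax_rotate (i, p) rest
        have hinv' : invA loc (rest ++ [(i, p)]) := by
          rcases hinv with hall | ⟨pp, hpp, hnn⟩
          · refine Or.inl fun e he => hall e ?_
            rcases List.mem_append.mp he with h1 | h1
            · exact List.mem_cons_of_mem _ h1
            · simp at h1; subst h1; exact List.mem_cons_self
          · refine Or.inr ⟨pp, ?_, hnn⟩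
            rcases List.mem_cons.mp hpp with heq | hmem
            · rw [heq]; simp
            · exact List.mem_append_left _ hmem
        have hdist : distMax (rest ++ [(i, p)]) + 1 = distMax ((i, p) :: rest) := by
          unfold distMax
          rw [hrot, ← hm, ← hpred]
          have hstop : ∃ x ∈ rest, pred x = false := by
            rcases hex_rest with ⟨e, he, heq⟩
            exact ⟨e, he, by simp [hpred, heq]⟩
          rw [takeWhile_append_of_stop pred rest [(i, p)] hstop]
          have hpredhd : pred (i, p) = true := by simp [hpred, hp2]
          rw [List.takeWhile_cons_of_pos hpredhd]
          simp
        have hb : (rest ++ [(i, p)]).length * (rest ++ [(i, p)]).length +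
            distMax (rest ++ [(i, p)]) ≤ f := by
          have h2 : (rest ++ [(i, p)]).length = ((i, p) :: rest).length := by simp
          rw [h2]
          omega
        have := ih (rest ++ [(i, p)]) order hinv' hb
        rw [hrot] at this
        rw [this]
        have hlen : (rest ++ [(i, p)]).length = (rest).length + 1 := by simp
        apply specS_rotate (i, p) rest loc order hp2 hex_rest

-- ---- ascending-list filter algebra ----
theorem filter_append_filter_of_lt {α : Type} (f : α → Int) (l : List α)
    (hl : l.Pairwise fun a b => f a < f b) (p q : α → Bool)
    (hord : ∀ x y, p x = true → q y = true → f x < f y) :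
    l.filter p ++ l.filter q = l.filter (fun x => p x || q x) := by
  induction l with
  | nil => rfl
  | cons x t ih =>
    have hx : ∀ y ∈ t, f x < f y := fun y hy => List.rel_of_pairwise_cons hl hy
    have ht : t.Pairwise fun a b => f a < f b := hl.of_cons
    by_cases hp : p x = true
    · have hq : q x = false := by
        by_contra hq'
        have := hord x x hp (by revert hq'; cases q x <;> simp)
        omega
      simp only [List.filter_cons, hp, hq, if_true, Bool.true_or, List.cons_append,
        Bool.false_eq_true, if_false]
      rw [ih ht]
    · by_cases hq : q x = true
      · have hpt : t.filter p = [] := by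
          apply List.filter_eq_nil_iff.mpr
          intro y hy hpy
          have h1 := hord y x hpy hq
          have h2 := hx y hy
          omega
        simp only [List.filter_cons, hp, hq, if_true, List.nil_append, Bool.false_or]
        rw [hpt, ← ih ht, hpt]
        simp
      · simp only [List.filter_cons, hp, hq]
        have : (p x || q x) = false := by
          revert hp hq; cases p x <;> cases q x <;> simp
        simp only [this, Bool.false_eq_true, if_false]
        exact ih ht

theorem asc_decomp_filter_left {α : Type} (f : α → Int) (T R : List α) (e : α)
    (h : (T ++ e :: R).Pairwise fun a b => f a < f b) :
    T = (T ++ e :: R).filter (fun x => decide (f x < f e)) := by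
  rcases List.pairwise_append.mp h with ⟨hT, hER, hcross⟩
  have hTlt : ∀ x ∈ T, f x < f e := fun x hx => hcross x hx e List.mem_cons_self
  have hRgt : ∀ x ∈ R, f e < f x := fun x hx => List.rel_of_pairwise_cons hER hx
  rw [List.filter_append]
  have h1 : T.filter (fun x => decide (f x < f e)) = T :=
    List.filter_eq_self.mpr fun x hx => by simpa using hTlt x hx
  have h2 : (e :: R).filter (fun x => decide (f x < f e)) = [] := by
    apply List.filter_eq_nil_iff.mpr
    intro x hx
    rcases List.mem_cons.mp hx with rfl | hxR
    · simp
    · have := hRgt x hxR; simp; omega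
  rw [h1, h2, List.append_nil]

theorem asc_decomp_filter_right {α : Type} (f : α → Int) (T R : List α) (e : α)
    (h : (T ++ e :: R).Pairwise fun a b => f a < f b) :
    R = (T ++ e :: R).filter (fun x => decide (f e < f x)) := by
  rcases List.pairwise_append.mp h with ⟨hT, hER, hcross⟩
  have hTlt : ∀ x ∈ T, f x < f e := fun x hx => hcross x hx e List.mem_cons_self
  have hRgt : ∀ x ∈ R, f e < f x := fun x hx => List.rel_of_pairwise_cons hER hx
  rw [List.filter_append]
  have h1 : T.filter (fun x => decide (f e < f x)) = [] := by
    apply List.filter_eq_nil_iff.mpr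
    intro x hx
    have := hTlt x hx; simp; omega
  have h2 : (e :: R).filter (fun x => decide (f e < f x)) = R := by
    rw [List.filter_cons]
    simp only [lt_self_iff_false, decide_false, Bool.false_eq_true, if_false]
    exact List.filter_eq_self.mpr fun x hx => by simpa using hRgt x hx
  rw [h1, h2, List.nil_append]

theorem mem_cyc_of_mem (c : Int) (l : List (Int × Int)) (x : Int × Int) (hx : x ∈ l) :
    x ∈ l.filter (fun e => decide (c ≤ e.1)) ++ l.filter (fun e => decide (e.1 < c)) := by
  by_cases hc : c ≤ x.1
  · exact List.mem_append_left _ (List.mem_filter.mpr ⟨hx, by simpa using hc⟩)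
  · exact List.mem_append_right _ (List.mem_filter.mpr ⟨hx, by simp; omega⟩)

theorem mem_of_mem_cyc (c : Int) (l : List (Int × Int)) (x : Int × Int)
    (hx : x ∈ l.filter (fun e => decide (c ≤ e.1)) ++ l.filter (fun e => decide (e.1 < c))) :
    x ∈ l := by
  rcases List.mem_append.mp hx with h | h
  · exact (List.mem_filter.mp h).1
  · exact (List.mem_filter.mp h).1

theorem length_filter_compl {α : Type} (l : List α) (p : α → Bool) :
    (l.filter p).length + (l.filter (fun x => !(p x))).length = l.length := by
  induction l with
  | nil => rfl
  | cons x t ih =>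
    rw [List.filter_cons, List.filter_cons]
    cases hp : p x <;> simp [hp] <;> omega

theorem dropWhile_append_all {α : Type} (p : α → Bool) (l1 l2 : List α)
    (h : ∀ x ∈ l1, p x = true) : (l1 ++ l2).dropWhile p = l2.dropWhile p := by
  induction l1 with
  | nil => rfl
  | cons x t ih =>
    rw [List.cons_append, List.dropWhile_cons_of_pos (h x List.mem_cons_self)]
    exact ih fun y hy => h y (List.mem_cons_of_mem _ hy)

theorem takeWhile_append_all {α : Type} (p : α → Bool) (l1 l2 : List α)
    (h : ∀ x ∈ l1, p x = true) : (l1 ++ l2).takeWhile p = l1 ++ l2.takeWhile p := by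
  induction l1 with
  | nil => rfl
  | cons x t ih =>
    rw [List.cons_append, List.takeWhile_cons_of_pos (h x List.mem_cons_self), List.cons_append,
      ih fun y hy => h y (List.mem_cons_of_mem _ hy)]

theorem asc_filter_fst_eq_singleton (l : List (Int × Int)) (e : Int × Int)
    (hl : l.Pairwise fun a b => a.1 < b.1) (he : e ∈ l) :
    l.filter (fun x => decide (x.1 = e.1)) = [e] := by
  induction l with
  | nil => cases he
  | cons x t ih =>
    have hx : ∀ y ∈ t, x.1 < y.1 := fun y hy => List.rel_of_pairwise_cons hl hy
    rcases List.mem_cons.mp he with heq | het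
    · rw [heq, List.filter_cons_of_pos (by simp)]
      have : t.filter (fun y => decide (y.1 = x.1)) = [] := by
        apply List.filter_eq_nil_iff.mpr
        intro y hy
        have := hx y hy; simp; omega
      rw [this]
    · rw [List.filter_cons_of_neg (by have := hx e het; simp; omega)]
      exact ih hl.of_cons het

-- the first element of X whose priority is k0, with the takeWhile/dropWhile decomposition
theorem first_level (k0 : Int) : ∀ (X : List (Int × Int)),
    X.filter (fun e => decide (e.2 = k0)) ≠ [] →
    ∃ a1 e a2, X = a1 ++ e :: a2 ∧
      X.dropWhile (fun e => decide (e.2 ≠ k0)) = e :: a2 ∧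
      X.takeWhile (fun e => decide (e.2 ≠ k0)) = a1 ∧ e.2 = k0 ∧
      X.filter (fun e => decide (e.2 = k0)) = e :: a2.filter (fun e => decide (e.2 = k0)) := by
  intro X
  induction X with
  | nil => intro h; exact absurd rfl h
  | cons x t ih =>
    intro h
    by_cases hx : x.2 = k0
    · refine ⟨[], x, t, by simp, ?_, ?_, hx, ?_⟩
      · exact List.dropWhile_cons_of_neg (by simp [hx])
      · exact List.takeWhile_cons_of_neg (by simp [hx])
      · exact List.filter_cons_of_pos (by simp [hx])
    · have ht : t.filter (fun e => decide (e.2 = k0)) ≠ [] := by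
        intro hnil
        apply h
        rw [List.filter_cons_of_neg (by simp [hx]), hnil]
      obtain ⟨a1, e, a2, hX, hd, htk, he2, hf⟩ := ih ht
      refine ⟨x :: a1, e, a2, by rw [List.cons_append, ← hX], ?_, ?_, he2, ?_⟩
      · rw [List.dropWhile_cons_of_pos (by simp [hx]), hd]
      · rw [List.takeWhile_cons_of_pos (by simp [hx]), htk]
      · rw [List.filter_cons_of_neg (by simp [hx]), hf]

-- ---- cyc: the queue determined by the alive processes and a cursor ----
def cyc (c : Int) (l : List (Int × Int)) : List (Int × Int) :=
  l.filter (fun e => decide (c ≤ e.1)) ++ l.filter (fun e => decide (e.1 < c))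

theorem length_cyc (c : Int) (l : List (Int × Int)) : (cyc c l).length = l.length := by
  unfold cyc
  rw [List.length_append]
  induction l with
  | nil => rfl
  | cons a t ih =>
    rw [List.filter_cons, List.filter_cons]
    by_cases hc : c ≤ a.1
    · have h2 : ¬ (a.1 < c) := by omega
      simp only [hc, h2, decide_true, decide_false, Bool.false_eq_true, if_false, if_true,
        List.length_cons]
      omega
    · have h2 : a.1 < c := by omega
      simp only [hc, h2, decide_true, decide_false, Bool.false_eq_true, if_false, if_true,
        List.length_cons]
      omega

-- ---- more filter algebra helpers ----
theorem filter_comm {α : Type} (l : List α) (p q : α → Bool) :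
    (l.filter p).filter q = (l.filter q).filter p := by
  rw [List.filter_filter, List.filter_filter]
  exact List.filter_congr fun x _ => Bool.and_comm _ _

theorem fcongr {α : Type} (l : List α) (P Q : α → Prop) [DecidablePred P] [DecidablePred Q]
    (h : ∀ x ∈ l, P x ↔ Q x) :
    l.filter (fun x => decide (P x)) = l.filter (fun x => decide (Q x)) :=
  List.filter_congr fun x hx => by simp only [decide_eq_decide]; exact h x hx

theorem ffc2 {α : Type} (l : List α) (P Q R : α → Prop) [DecidablePred P] [DecidablePred Q]
    [DecidablePred R] (h : ∀ x ∈ l, (Q x ∧ P x) ↔ R x) :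
    (l.filter (fun x => decide (P x))).filter (fun x => decide (Q x)) =
      l.filter (fun x => decide (R x)) := by
  rw [List.filter_filter]
  exact List.filter_congr fun x hx => by
    rw [← Bool.decide_and, decide_eq_decide]; exact h x hx

theorem ffc2or {α : Type} (l : List α) (P Q R : α → Prop) [DecidablePred P] [DecidablePred Q]
    [DecidablePred R] (h : ∀ x ∈ l, (P x ∨ Q x) ↔ R x) :
    l.filter (fun x => decide (P x) || decide (Q x)) = l.filter (fun x => decide (R x)) :=
  List.filter_congr fun x hx => by
    rw [← Bool.decide_or, decide_eq_decide]; exact h x hx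

-- ---- L2 inner: one priority level ----
def LevelGoal (loc k0 : Int) (n : Nat) : Prop :=
  ∀ (alive : List (Int × Int)) (cursor order : Int),
    (alive.filter (fun e => decide (e.2 = k0))).length = n →
    alive.Pairwise (fun a b => a.1 < b.1) →
    (∀ e ∈ alive, e.2 ≤ k0) → 0 ≤ k0 →
    match altInner ((cyc cursor (alive.filter (fun e => decide (e.2 = k0)))).map (·.1)) loc order cursor with
    | (some r, _, _) => specS (cyc cursor alive).length (cyc cursor alive) loc order = r
    | (none, order', cursor') =>
        specS (cyc cursor alive).length (cyc cursor alive) loc order =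
          specS (cyc cursor' (alive.filter (fun e => decide (e.2 ≠ k0)))).length
                (cyc cursor' (alive.filter (fun e => decide (e.2 ≠ k0)))) loc order'

theorem level_core (loc k0 : Int) (n : Nat) (IH : LevelGoal loc k0 n)
    (alive astar : List (Int × Int)) (cursor order : Int) (e : Int × Int)
    (rest1 rest2 : List (Int × Int)) (tailseq : List Int)
    (hmcyc : solGetMax (cyc cursor alive) = k0)
    (hdrop : (cyc cursor alive).dropWhile (fun x => decide (x.2 ≠ k0)) = e :: rest1)
    (htake : (cyc cursor alive).takeWhile (fun x => decide (x.2 ≠ k0)) = rest2)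
    (hN : rest1 ++ rest2 = cyc (e.1 + 1) astar)
    (hseq : (cyc cursor (alive.filter (fun x => decide (x.2 = k0)))).map (·.1) = e.1 :: tailseq)
    (hseqIH : (cyc (e.1 + 1) (astar.filter (fun x => decide (x.2 = k0)))).map (·.1) = tailseq)
    (hlenstar : (astar.filter (fun x => decide (x.2 = k0))).length = n)
    (hascstar : astar.Pairwise (fun a b => a.1 < b.1))
    (hmaxstar : ∀ x ∈ astar, x.2 ≤ k0)
    (hk0 : 0 ≤ k0)
    (heq' : astar.filter (fun x => decide (x.2 ≠ k0)) = alive.filter (fun x => decide (x.2 ≠ k0)))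
    (hlen1 : alive.length = astar.length + 1) :
    (match altInner ((cyc cursor (alive.filter (fun e => decide (e.2 = k0)))).map (·.1)) loc order cursor with
     | (some r, _, _) => specS (cyc cursor alive).length (cyc cursor alive) loc order = r
     | (none, order', cursor') =>
         specS (cyc cursor alive).length (cyc cursor alive) loc order =
           specS (cyc cursor' (alive.filter (fun e => decide (e.2 ≠ k0)))).length
                 (cyc cursor' (alive.filter (fun e => decide (e.2 ≠ k0)))) loc order') := by
  have hlen2 : (cyc cursor alive).length = astar.length + 1 := by rw [length_cyc, hlen1]
  have hunfold : specS (cyc cursor alive).length (cyc cursor alive) loc order =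
      if e.1 = loc then order + 1
      else specS (cyc (e.1 + 1) astar).length (cyc (e.1 + 1) astar) loc (order + 1) := by
    rw [hlen2, length_cyc]
    show specS (astar.length + 1) (cyc cursor alive) loc order = _
    simp only [specS]
    rw [hmcyc, hdrop, htake]
    simp only []
    rw [hN]
  rw [hseq]
  by_cases hloc : e.1 = loc
  · rw [show altInner (e.1 :: tailseq) loc order cursor = (some (order + 1), order + 1, e.1 + 1) by
      simp [altInner, hloc]]
    show specS (cyc cursor alive).length (cyc cursor alive) loc order = order + 1
    rw [hunfold, if_pos hloc]
  · rw [show altInner (e.1 :: tailseq) loc order cursor = altInner tailseq loc (order + 1) (e.1 + 1) by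
      simp [altInner, hloc]]
    have IH' := IH astar (e.1 + 1) (order + 1) hlenstar hascstar hmaxstar hk0
    rw [hseqIH] at IH'
    rcases haI : altInner tailseq loc (order + 1) (e.1 + 1) with ⟨o?, o', c'⟩
    rw [haI] at IH'
    cases o? with
    | some r =>
      show specS (cyc cursor alive).length (cyc cursor alive) loc order = r
      rw [hunfold, if_neg hloc]
      exact IH'
    | none =>
      show specS (cyc cursor alive).length (cyc cursor alive) loc order =
        specS (cyc c' (alive.filter (fun x => decide (x.2 ≠ k0)))).length
              (cyc c' (alive.filter (fun x => decide (x.2 ≠ k0)))) loc o'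
      rw [hunfold, if_neg hloc, ← heq']
      exact IH'

theorem level_step (loc k0 : Int) : ∀ n : Nat, LevelGoal loc k0 n := by
  intro n
  induction n with
  | zero =>
    intro alive cursor order hlen hasc hmax hk0
    have hLv : alive.filter (fun e => decide (e.2 = k0)) = [] := List.length_eq_zero_iff.mp hlen
    have hall : alive.filter (fun e => decide (e.2 ≠ k0)) = alive := by
      apply List.filter_eq_self.mpr
      intro x hx
      simp only [ne_eq, decide_eq_true_eq]
      intro hx2
      have : x ∈ alive.filter (fun e => decide (e.2 = k0)) :=
        List.mem_filter.mpr ⟨hx, by simp [hx2]⟩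
      rw [hLv] at this; cases this
    rw [hLv]
    show specS (cyc cursor alive).length (cyc cursor alive) loc order =
      specS (cyc cursor (alive.filter (fun e => decide (e.2 ≠ k0)))).length
            (cyc cursor (alive.filter (fun e => decide (e.2 ≠ k0)))) loc order
    rw [hall]
  | succ n ihn =>
    intro alive cursor order hlen hasc hmax hk0
    have hLvne : alive.filter (fun e => decide (e.2 = k0)) ≠ [] := by
      intro h; rw [h] at hlen; simp at hlen
    obtain ⟨w, hw⟩ := List.exists_mem_of_ne_nil _ hLvne
    obtain ⟨hwal, hw2'⟩ := List.mem_filter.mp hw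
    have hw2 : w.2 = k0 := by simpa using hw2'
    have hmcyc : solGetMax (cyc cursor alive) = k0 := by
      apply le_antisymm
      · exact solGetMax_le _ k0 hk0 fun x hx => hmax x (mem_of_mem_cyc cursor alive x hx)
      · rw [← hw2]; exact le_solGetMax _ w (mem_cyc_of_mem cursor alive w hwal)
    have hascA : (alive.filter (fun x => decide (cursor ≤ x.1))).Pairwise (fun a b => a.1 < b.1) :=
      hasc.filter _
    have hascB : (alive.filter (fun x => decide (x.1 < cursor))).Pairwise (fun a b => a.1 < b.1) :=
      hasc.filter _
    have hcyc : cyc cursor alive =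
        alive.filter (fun x => decide (cursor ≤ x.1)) ++ alive.filter (fun x => decide (x.1 < cursor)) := rfl
    by_cases hLA : (alive.filter (fun x => decide (cursor ≤ x.1))).filter (fun x => decide (x.2 = k0)) = []
    · -- the first maximal process sits in the wrapped-around part (index < cursor)
      have hAall : ∀ x ∈ alive.filter (fun x => decide (cursor ≤ x.1)),
          (fun x : Int × Int => decide (x.2 ≠ k0)) x = true := by
        intro x hx
        simp only [ne_eq, decide_eq_true_eq]
        intro h2
        have : x ∈ (alive.filter (fun x => decide (cursor ≤ x.1))).filter (fun x => decide (x.2 = k0)) :=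
          List.mem_filter.mpr ⟨hx, by simp [h2]⟩
        rw [hLA] at this; cases this
      have hLBne : (alive.filter (fun x => decide (x.1 < cursor))).filter (fun x => decide (x.2 = k0)) ≠ [] := by
        intro hnil
        by_cases hwc : cursor ≤ w.1
        · have : w ∈ (alive.filter (fun x => decide (cursor ≤ x.1))).filter (fun x => decide (x.2 = k0)) :=
            List.mem_filter.mpr ⟨List.mem_filter.mpr ⟨hwal, by simp [hwc]⟩, by simp [hw2]⟩
          rw [hLA] at this; cases this
        · have : w ∈ (alive.filter (fun x => decide (x.1 < cursor))).filter (fun x => decide (x.2 = k0)) :=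
            List.mem_filter.mpr ⟨List.mem_filter.mpr ⟨hwal, by simp; omega⟩, by simp [hw2]⟩
          rw [hnil] at this; cases this
      obtain ⟨b1, e, b2, hB1eq, hdB1, htB1, he2, hfB1⟩ := first_level k0 _ hLBne
      have heB1 : e ∈ alive.filter (fun x => decide (x.1 < cursor)) := by
        rw [hB1eq]; exact List.mem_append_right _ List.mem_cons_self
      obtain ⟨heal, hce'⟩ := List.mem_filter.mp heB1
      have hce : e.1 < cursor := by simpa using hce'
      have hB1asc : (b1 ++ e :: b2).Pairwise (fun a b => a.1 < b.1) := hB1eq ▸ hascB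
      have hb1 : b1 = (alive.filter (fun x => decide (x.1 < cursor))).filter (fun x => decide (x.1 < e.1)) := by
        conv_lhs => rw [asc_decomp_filter_left (·.1) b1 b2 e hB1asc]
        rw [← hB1eq]
      have hb2 : b2 = (alive.filter (fun x => decide (x.1 < cursor))).filter (fun x => decide (e.1 < x.1)) := by
        conv_lhs => rw [asc_decomp_filter_right (·.1) b1 b2 e hB1asc]
        rw [← hB1eq]
      have hb1' : b1 = alive.filter (fun x => decide (x.1 < e.1)) := by
        have h : ∀ x ∈ alive.filter (fun x => decide (x.1 < e.1)),
            (fun x : Int × Int => decide (x.1 < cursor)) x = true := by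
          intro x hx
          have := (List.mem_filter.mp hx).2
          simp only [decide_eq_true_eq] at this ⊢
          omega
        rw [hb1, filter_comm, List.filter_eq_self.mpr h]
      have hb2' : b2 = alive.filter (fun x => decide (e.1 < x.1 ∧ x.1 < cursor)) := by
        rw [hb2]
        exact ffc2 alive _ _ _ fun x _ => Iff.rfl
      set astar := alive.filter (fun x => decide (x.1 ≠ e.1)) with hastar
      have hsingle : alive.filter (fun x => decide (x.1 = e.1)) = [e] :=
        asc_filter_fst_eq_singleton alive e hasc heal
      have huniq : ∀ x ∈ alive, x.1 = e.1 → x = e := by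
        intro x hx h1
        have : x ∈ alive.filter (fun x => decide (x.1 = e.1)) :=
          List.mem_filter.mpr ⟨hx, by simp [h1]⟩
        rw [hsingle] at this
        simpa using this
      -- one step of specS
      have hdrop : (cyc cursor alive).dropWhile (fun x => decide (x.2 ≠ k0)) = e :: b2 := by
        rw [hcyc, dropWhile_append_all _ _ _ hAall, hdB1]
      have htake : (cyc cursor alive).takeWhile (fun x => decide (x.2 ≠ k0)) =
          alive.filter (fun x => decide (cursor ≤ x.1)) ++ b1 := by
        rw [hcyc, takeWhile_append_all _ _ _ hAall, htB1]
      have hstar1 : astar.filter (fun x => decide (e.1 + 1 ≤ x.1)) =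
          alive.filter (fun x => decide (e.1 < x.1)) :=
        ffc2 alive _ _ _ fun x _ => by omega
      have hstar2 : astar.filter (fun x => decide (x.1 < e.1 + 1)) =
          alive.filter (fun x => decide (x.1 < e.1)) :=
        ffc2 alive _ _ _ fun x _ => by omega
      have hb2A : alive.filter (fun x => decide (e.1 < x.1 ∧ x.1 < cursor)) ++
          alive.filter (fun x => decide (cursor ≤ x.1)) = alive.filter (fun x => decide (e.1 < x.1)) := by
        rw [filter_append_filter_of_lt (·.1) alive hasc _ _
          (fun x y hx hy => by
            simp only [decide_eq_true_eq] at hx hy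
            show x.1 < y.1
            omega)]
        exact ffc2or alive (fun x => e.1 < x.1 ∧ x.1 < cursor) (fun x => cursor ≤ x.1)
          (fun x => e.1 < x.1) fun x _ => by omega
      have hNeq : b2 ++ (alive.filter (fun x => decide (cursor ≤ x.1)) ++ b1) =
          cyc (e.1 + 1) astar := by
        show _ = astar.filter (fun x => decide (e.1 + 1 ≤ x.1)) ++
          astar.filter (fun x => decide (x.1 < e.1 + 1))
        rw [hstar1, hstar2, hb1', hb2', ← List.append_assoc, hb2A]
      -- the per-level sequence
      have hLAseq : (alive.filter (fun x => decide (x.2 = k0))).filter (fun x => decide (cursor ≤ x.1)) = [] := by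
        rw [filter_comm]; exact hLA
      have hLBseq : (alive.filter (fun x => decide (x.2 = k0))).filter (fun x => decide (x.1 < cursor)) =
          e :: b2.filter (fun x => decide (x.2 = k0)) := by
        rw [filter_comm]; exact hfB1
      have hseq : (cyc cursor (alive.filter (fun x => decide (x.2 = k0)))).map (·.1) =
          e.1 :: (b2.filter (fun x => decide (x.2 = k0))).map (·.1) := by
        show ((alive.filter (fun x => decide (x.2 = k0))).filter (fun x => decide (cursor ≤ x.1)) ++
          (alive.filter (fun x => decide (x.2 = k0))).filter (fun x => decide (x.1 < cursor))).map (·.1) = _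
        rw [hLAseq, hLBseq]
        simp
      have hLvstar : astar.filter (fun x => decide (x.2 = k0)) =
          (alive.filter (fun x => decide (x.2 = k0))).filter (fun x => decide (x.1 ≠ e.1)) :=
        filter_comm alive _ _
      have hlevno : ∀ x ∈ alive, x.2 = k0 → cursor ≤ x.1 → False := by
        intro x hxal hx2 hxc
        have : x ∈ (alive.filter (fun x => decide (cursor ≤ x.1))).filter (fun x => decide (x.2 = k0)) :=
          List.mem_filter.mpr ⟨List.mem_filter.mpr ⟨hxal, by simp [hxc]⟩, by simp [hx2]⟩
        rw [hLA] at this; cases this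
      have hb1no : ∀ x ∈ alive, x.2 = k0 → x.1 < e.1 → False := by
        intro x hxal hx2 hxe
        have hxb1 : x ∈ b1 := by
          rw [hb1]
          refine List.mem_filter.mpr ⟨List.mem_filter.mpr ⟨hxal, ?_⟩, by simp [hxe]⟩
          simp; omega
        have : x ∈ (alive.filter (fun x => decide (x.1 < cursor))).takeWhile
            (fun e => decide (e.2 ≠ k0)) := by rw [htB1]; exact hxb1
        have := List.mem_takeWhile_imp this
        simp only [ne_eq, decide_eq_true_eq] at this
        exact this hx2
      have hs1 : (astar.filter (fun x => decide (x.2 = k0))).filter (fun x => decide (e.1 + 1 ≤ x.1)) =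
          b2.filter (fun x => decide (x.2 = k0)) := by
        rw [hLvstar]
        have h1 : ((alive.filter (fun x => decide (x.2 = k0))).filter (fun x => decide (x.1 ≠ e.1))).filter
            (fun x => decide (e.1 + 1 ≤ x.1)) =
            (alive.filter (fun x => decide (x.2 = k0))).filter (fun x => decide (e.1 < x.1)) :=
          ffc2 _ _ _ _ fun x _ => by omega
        rw [h1, hb2']
        have h2 : (alive.filter (fun x => decide (e.1 < x.1 ∧ x.1 < cursor))).filter
            (fun x => decide (x.2 = k0)) =
            (alive.filter (fun x => decide (x.2 = k0))).filter (fun x => decide (e.1 < x.1 ∧ x.1 < cursor)) :=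
          filter_comm alive _ _
        rw [h2]
        apply fcongr
        intro x hx
        obtain ⟨hxal, hx2'⟩ := List.mem_filter.mp hx
        have hx2 : x.2 = k0 := by simpa using hx2'
        constructor
        · intro h
          refine ⟨h, ?_⟩
          by_contra hc
          exact hlevno x hxal hx2 (by omega)
        · intro h; exact h.1
      have hs2 : (astar.filter (fun x => decide (x.2 = k0))).filter (fun x => decide (x.1 < e.1 + 1)) = [] := by
        rw [hLvstar]
        have h1 : ((alive.filter (fun x => decide (x.2 = k0))).filter (fun x => decide (x.1 ≠ e.1))).filter
            (fun x => decide (x.1 < e.1 + 1)) =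
            (alive.filter (fun x => decide (x.2 = k0))).filter (fun x => decide (x.1 < e.1)) :=
          ffc2 _ _ _ _ fun x _ => by omega
        rw [h1]
        apply List.filter_eq_nil_iff.mpr
        intro x hx
        obtain ⟨hxal, hx2'⟩ := List.mem_filter.mp hx
        have hx2 : x.2 = k0 := by simpa using hx2'
        simp only [decide_eq_true_eq]
        intro hxe
        exact hb1no x hxal hx2 hxe
      have hseqIH : (cyc (e.1 + 1) (astar.filter (fun x => decide (x.2 = k0)))).map (·.1) =
          (b2.filter (fun x => decide (x.2 = k0))).map (·.1) := by
        show ((astar.filter (fun x => decide (x.2 = k0))).filter (fun x => decide (e.1 + 1 ≤ x.1)) ++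
          (astar.filter (fun x => decide (x.2 = k0))).filter (fun x => decide (x.1 < e.1 + 1))).map (·.1) = _
        rw [hs1, hs2]
        simp
      -- lengths
      have hlen1 : alive.length = astar.length + 1 := by
        have hcompl := length_filter_compl alive (fun x => decide (x.1 = e.1))
        have hne : alive.filter (fun x => !(decide (x.1 = e.1))) = astar :=
          List.filter_congr fun x _ => by simp
        rw [hsingle, hne] at hcompl
        simp only [List.length_cons, List.length_nil] at hcompl
        omega
      have hlenstar : (astar.filter (fun x => decide (x.2 = k0))).length = n := by
        have l1 := congrArg List.length hseq
        have l2 := congrArg List.length hseqIH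
        rw [List.length_map, length_cyc] at l1 l2
        rw [hlen] at l1
        simp only [List.length_cons] at l1
        omega
      have heq' : astar.filter (fun x => decide (x.2 ≠ k0)) =
          alive.filter (fun x => decide (x.2 ≠ k0)) := by
        apply ffc2 alive _ _ _
        intro x hx
        constructor
        · intro h; exact h.1
        · intro h
          refine ⟨h, ?_⟩
          intro h1
          exact h (huniq x hx h1 ▸ he2)
      exact level_core loc k0 n ihn alive astar cursor order e _ _ _ hmcyc hdrop htake hNeq
        hseq hseqIH hlenstar (hasc.filter _) (fun x hx => hmax x (List.mem_filter.mp hx).1)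
        hk0 heq' hlen1
    · -- the first maximal process sits at index ≥ cursor
      obtain ⟨a1, e, a2, hA1eq, hdA1, htA1, he2, hfA1⟩ := first_level k0 _ hLA
      have heA1 : e ∈ alive.filter (fun x => decide (cursor ≤ x.1)) := by
        rw [hA1eq]; exact List.mem_append_right _ List.mem_cons_self
      obtain ⟨heal, hce'⟩ := List.mem_filter.mp heA1
      have hce : cursor ≤ e.1 := by simpa using hce'
      have hA1asc : (a1 ++ e :: a2).Pairwise (fun a b => a.1 < b.1) := hA1eq ▸ hascA
      have ha1 : a1 = (alive.filter (fun x => decide (cursor ≤ x.1))).filter (fun x => decide (x.1 < e.1)) := by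
        conv_lhs => rw [asc_decomp_filter_left (·.1) a1 a2 e hA1asc]
        rw [← hA1eq]
      have ha2 : a2 = (alive.filter (fun x => decide (cursor ≤ x.1))).filter (fun x => decide (e.1 < x.1)) := by
        conv_lhs => rw [asc_decomp_filter_right (·.1) a1 a2 e hA1asc]
        rw [← hA1eq]
      have ha2' : a2 = alive.filter (fun x => decide (e.1 < x.1)) := by
        have h : ∀ x ∈ alive.filter (fun x => decide (e.1 < x.1)),
            (fun x : Int × Int => decide (cursor ≤ x.1)) x = true := by
          intro x hx
          have := (List.mem_filter.mp hx).2
          simp only [decide_eq_true_eq] at this ⊢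
          omega
        rw [ha2, filter_comm, List.filter_eq_self.mpr h]
      set astar := alive.filter (fun x => decide (x.1 ≠ e.1)) with hastar
      have hsingle : alive.filter (fun x => decide (x.1 = e.1)) = [e] :=
        asc_filter_fst_eq_singleton alive e hasc heal
      have huniq : ∀ x ∈ alive, x.1 = e.1 → x = e := by
        intro x hx h1
        have : x ∈ alive.filter (fun x => decide (x.1 = e.1)) :=
          List.mem_filter.mpr ⟨hx, by simp [h1]⟩
        rw [hsingle] at this
        simpa using this
      -- one step of specS
      have hstop : ∃ x ∈ alive.filter (fun x => decide (cursor ≤ x.1)),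
          (fun x : Int × Int => decide (x.2 ≠ k0)) x = false := ⟨e, heA1, by simp [he2]⟩
      have hdrop : (cyc cursor alive).dropWhile (fun x => decide (x.2 ≠ k0)) =
          e :: (a2 ++ alive.filter (fun x => decide (x.1 < cursor))) := by
        rw [hcyc, dropWhile_append_of_stop _ _ _ hstop, hdA1]
        simp
      have htake : (cyc cursor alive).takeWhile (fun x => decide (x.2 ≠ k0)) = a1 := by
        rw [hcyc, takeWhile_append_of_stop _ _ _ hstop, htA1]
      have ha1' : a1 = alive.filter (fun x => decide (cursor ≤ x.1 ∧ x.1 < e.1)) := by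
        rw [ha1]
        exact ffc2 alive _ _ _ fun x _ => And.comm
      have hBa1 : alive.filter (fun x => decide (x.1 < cursor)) ++ a1 =
          alive.filter (fun x => decide (x.1 < e.1)) := by
        rw [ha1']
        rw [filter_append_filter_of_lt (·.1) alive hasc _ _
          (fun x y hx hy => by
            simp only [decide_eq_true_eq] at hx hy
            show x.1 < y.1
            omega)]
        exact ffc2or alive (fun x => x.1 < cursor) (fun x => cursor ≤ x.1 ∧ x.1 < e.1)
          (fun x => x.1 < e.1) fun x _ => by omega
      have hstar1 : astar.filter (fun x => decide (e.1 + 1 ≤ x.1)) =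
          alive.filter (fun x => decide (e.1 < x.1)) :=
        ffc2 alive _ _ _ fun x _ => by omega
      have hstar2 : astar.filter (fun x => decide (x.1 < e.1 + 1)) =
          alive.filter (fun x => decide (x.1 < e.1)) :=
        ffc2 alive _ _ _ fun x _ => by omega
      have hNeq : (a2 ++ alive.filter (fun x => decide (x.1 < cursor))) ++ a1 =
          cyc (e.1 + 1) astar := by
        show _ = astar.filter (fun x => decide (e.1 + 1 ≤ x.1)) ++
          astar.filter (fun x => decide (x.1 < e.1 + 1))
        rw [hstar1, hstar2, ha2', List.append_assoc, hBa1]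
      -- the per-level sequence
      have hLA' : (alive.filter (fun x => decide (x.2 = k0))).filter (fun x => decide (cursor ≤ x.1)) =
          e :: a2.filter (fun x => decide (x.2 = k0)) := by
        rw [filter_comm]; exact hfA1
      have hseq : (cyc cursor (alive.filter (fun x => decide (x.2 = k0)))).map (·.1) =
          e.1 :: (a2.filter (fun x => decide (x.2 = k0)) ++
            (alive.filter (fun x => decide (x.2 = k0))).filter (fun x => decide (x.1 < cursor))).map (·.1) := by
        show ((alive.filter (fun x => decide (x.2 = k0))).filter (fun x => decide (cursor ≤ x.1)) ++
          (alive.filter (fun x => decide (x.2 = k0))).filter (fun x => decide (x.1 < cursor))).map (·.1) = _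
        rw [hLA']
        simp [List.map_append]
      have hLvstar : astar.filter (fun x => decide (x.2 = k0)) =
          (alive.filter (fun x => decide (x.2 = k0))).filter (fun x => decide (x.1 ≠ e.1)) :=
        filter_comm alive _ _
      have hs1 : (astar.filter (fun x => decide (x.2 = k0))).filter (fun x => decide (e.1 + 1 ≤ x.1)) =
          a2.filter (fun x => decide (x.2 = k0)) := by
        rw [hLvstar]
        have h1 : ((alive.filter (fun x => decide (x.2 = k0))).filter (fun x => decide (x.1 ≠ e.1))).filter
            (fun x => decide (e.1 + 1 ≤ x.1)) =
            (alive.filter (fun x => decide (x.2 = k0))).filter (fun x => decide (e.1 < x.1)) :=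
          ffc2 _ _ _ _ fun x _ => by omega
        rw [h1, ha2', filter_comm]
      have hano : ∀ x ∈ alive, x.2 = k0 → cursor ≤ x.1 → x.1 < e.1 → False := by
        intro x hxal hx2 hxc hxe
        have hxa1 : x ∈ a1 := by
          rw [ha1]
          exact List.mem_filter.mpr ⟨List.mem_filter.mpr ⟨hxal, by simp [hxc]⟩, by simp [hxe]⟩
        have : x ∈ (alive.filter (fun x => decide (cursor ≤ x.1))).takeWhile
            (fun e => decide (e.2 ≠ k0)) := by rw [htA1]; exact hxa1
        have := List.mem_takeWhile_imp this
        simp only [ne_eq, decide_eq_true_eq] at this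
        exact this hx2
      have hs2 : (astar.filter (fun x => decide (x.2 = k0))).filter (fun x => decide (x.1 < e.1 + 1)) =
          (alive.filter (fun x => decide (x.2 = k0))).filter (fun x => decide (x.1 < cursor)) := by
        rw [hLvstar]
        have h1 : ((alive.filter (fun x => decide (x.2 = k0))).filter (fun x => decide (x.1 ≠ e.1))).filter
            (fun x => decide (x.1 < e.1 + 1)) =
            (alive.filter (fun x => decide (x.2 = k0))).filter (fun x => decide (x.1 < e.1)) :=
          ffc2 _ _ _ _ fun x _ => by omega
        rw [h1]
        apply fcongr
        intro x hx
        obtain ⟨hxal, hx2'⟩ := List.mem_filter.mp hx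
        have hx2 : x.2 = k0 := by simpa using hx2'
        constructor
        · intro h
          by_contra hc
          exact hano x hxal hx2 (by omega) h
        · intro h; omega
      have hseqIH : (cyc (e.1 + 1) (astar.filter (fun x => decide (x.2 = k0)))).map (·.1) =
          (a2.filter (fun x => decide (x.2 = k0)) ++
            (alive.filter (fun x => decide (x.2 = k0))).filter (fun x => decide (x.1 < cursor))).map (·.1) := by
        show ((astar.filter (fun x => decide (x.2 = k0))).filter (fun x => decide (e.1 + 1 ≤ x.1)) ++
          (astar.filter (fun x => decide (x.2 = k0))).filter (fun x => decide (x.1 < e.1 + 1))).map (·.1) = _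
        rw [hs1, hs2]
      -- lengths
      have hlen1 : alive.length = astar.length + 1 := by
        have hcompl := length_filter_compl alive (fun x => decide (x.1 = e.1))
        have hne : alive.filter (fun x => !(decide (x.1 = e.1))) = astar :=
          List.filter_congr fun x _ => by simp
        rw [hsingle, hne] at hcompl
        simp only [List.length_cons, List.length_nil] at hcompl
        omega
      have hlenstar : (astar.filter (fun x => decide (x.2 = k0))).length = n := by
        have l1 := congrArg List.length hseq
        have l2 := congrArg List.length hseqIH
        rw [List.length_map, length_cyc] at l1 l2
        rw [hlen] at l1
        simp only [List.length_cons] at l1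
        omega
      have heq' : astar.filter (fun x => decide (x.2 ≠ k0)) =
          alive.filter (fun x => decide (x.2 ≠ k0)) := by
        apply ffc2 alive _ _ _
        intro x hx
        constructor
        · intro h; exact h.1
        · intro h
          refine ⟨h, ?_⟩
          intro h1
          exact h (huniq x hx h1 ▸ he2)
      exact level_core loc k0 n ihn alive astar cursor order e _ _ _ hmcyc hdrop htake hNeq
        hseq hseqIH hlenstar (hasc.filter _) (fun x hx => hmax x (List.mem_filter.mp hx).1)
        hk0 heq' hlen1

theorem altInner_none_not_mem (loc : Int) : ∀ (seq : List Int) (order cursor : Int) (o' c' : Int),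
    altInner seq loc order cursor = (none, o', c') → loc ∉ seq := by
  intro seq
  induction seq with
  | nil => intro _ _ _ _ _; simp
  | cons i rest ih =>
    intro order cursor o' c' heq
    simp only [altInner] at heq
    by_cases hi : i = loc
    · simp [hi] at heq
    · simp only [hi, if_false] at heq
      intro hmem
      rcases List.mem_cons.mp hmem with rfl | hmem'
      · exact hi rfl
      · exact ih _ _ _ _ heq hmem'


-- ---- L2: walking the levels ----
theorem levels_eq (loc : Int) (g : PySem.Dict Int (List Int)) :
    ∀ (ks : List Int) (alive : List (Int × Int)) (cursor order : Int),
    ks.Pairwise (· > ·) →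
    (∀ e ∈ alive, e.2 ∈ ks) →
    (∀ k ∈ ks, ∃ e ∈ alive, e.2 = k) →
    alive.Pairwise (fun a b => a.1 < b.1) →
    (∀ k ∈ ks, g.getD k [] = (alive.filter (fun e => decide (e.2 = k))).map (·.1)) →
    ((∀ k ∈ ks, 0 ≤ k) ∨ ∃ p, (loc, p) ∈ alive ∧ 0 ≤ p) →
    specS (cyc cursor alive).length (cyc cursor alive) loc order = altLevels ks g cursor order loc := by
  intro ks
  induction ks with
  | nil =>
    intro alive cursor order _ hprio _ _ _ _
    have halive : alive = [] := by
      cases alive with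
      | nil => rfl
      | cons e t => exact absurd (hprio e List.mem_cons_self) (by simp)
    subst halive
    rfl
  | cons k0 ks' ih =>
    intro alive cursor order hks hprio hne hasc hgroups hinv
    have hk0gt : ∀ k ∈ ks', k0 > k := fun k hk => List.rel_of_pairwise_cons hks hk
    have hk0max : ∀ e ∈ alive, e.2 ≤ k0 := by
      intro e he
      rcases List.mem_cons.mp (hprio e he) with h | h
      · omega
      · have := hk0gt _ h; omega
    have hk0nn : 0 ≤ k0 := by
      rcases hinv with hall | ⟨p, hp, hpn⟩
      · exact hall k0 List.mem_cons_self
      · have := hk0max (loc, p) hp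
        simp only at this
        omega
    -- the sequence of this level
    have hidxs : g.getD k0 [] = (alive.filter (fun e => decide (e.2 = k0))).map (·.1) :=
      hgroups k0 List.mem_cons_self
    have hseqeq :
        ((alive.filter (fun e => decide (e.2 = k0))).map (·.1)).filter (fun i => decide (cursor ≤ i)) ++
        ((alive.filter (fun e => decide (e.2 = k0))).map (·.1)).filter (fun i => decide (i < cursor)) =
        (cyc cursor (alive.filter (fun e => decide (e.2 = k0)))).map (·.1) := by
      show _ = ((alive.filter (fun e => decide (e.2 = k0))).filter (fun e => decide (cursor ≤ e.1)) ++
        (alive.filter (fun e => decide (e.2 = k0))).filter (fun e => decide (e.1 < cursor))).map (·.1)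
      rw [List.map_append, List.filter_map, List.filter_map]
      rfl
    have haltL : altLevels (k0 :: ks') g cursor order loc =
        match altInner ((cyc cursor (alive.filter (fun e => decide (e.2 = k0)))).map (·.1)) loc order cursor with
        | (some r, _, _) => r
        | (none, order', cursor') => altLevels ks' g cursor' order' loc := by
      show (match altInner ((g.getD k0 []).filter (fun i => decide (cursor ≤ i)) ++
          (g.getD k0 []).filter (fun i => decide (i < cursor))) loc order cursor with
        | (some r, _, _) => r
        | (none, order', cursor') => altLevels ks' g cursor' order' loc) = _
      rw [hidxs, hseqeq]
    rw [haltL]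
    have LS := level_step loc k0 (alive.filter (fun e => decide (e.2 = k0))).length
      alive cursor order rfl hasc hk0max hk0nn
    rcases haI : altInner ((cyc cursor (alive.filter (fun e => decide (e.2 = k0)))).map (·.1))
      loc order cursor with ⟨o?, o', c'⟩
    rw [haI] at LS
    rw [haI]
    cases o? with
    | some r => exact LS
    | none =>
      -- recurse into the remaining levels
      have hnotmem : loc ∉ (cyc cursor (alive.filter (fun e => decide (e.2 = k0)))).map (·.1) :=
        altInner_none_not_mem loc _ order cursor o' c' haI
      have halive' : ∀ {k : Int}, k ≠ k0 →
          (alive.filter (fun e => decide (e.2 ≠ k0))).filter (fun e => decide (e.2 = k)) =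
          alive.filter (fun e => decide (e.2 = k)) := by
        intro k hk
        apply ffc2 alive _ _ _
        intro x _
        constructor
        · intro h; exact h.1
        · intro h; exact ⟨h, by rw [h]; exact hk⟩
      have step := ih (alive.filter (fun e => decide (e.2 ≠ k0))) c' o'
        hks.of_cons
        (by
          intro e he
          obtain ⟨heal, hene⟩ := List.mem_filter.mp he
          simp only [ne_eq, decide_eq_true_eq] at hene
          rcases List.mem_cons.mp (hprio e heal) with h | h
          · exact absurd h hene
          · exact h)
        (by
          intro k hk
          obtain ⟨e, he, he2⟩ := hne k (List.mem_cons_of_mem _ hk)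
          have hkne : e.2 ≠ k0 := by have := hk0gt k hk; omega
          exact ⟨e, List.mem_filter.mpr ⟨he, by simpa using hkne⟩, he2⟩)
        (hasc.filter _)
        (by
          intro k hk
          have hkne : k ≠ k0 := by have := hk0gt k hk; omega
          rw [hgroups k (List.mem_cons_of_mem _ hk), halive' hkne])
        (by
          rcases hinv with hall | ⟨p, hp, hpn⟩
          · exact Or.inl fun k hk => hall k (List.mem_cons_of_mem _ hk)
          · right
            refine ⟨p, ?_, hpn⟩
            have hpne : p ≠ k0 := by
              intro hpk
              apply hnotmem
              refine List.mem_map.mpr ⟨(loc, p), ?_, rfl⟩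
              apply mem_cyc_of_mem
              exact List.mem_filter.mpr ⟨hp, by simp [hpk]⟩
            exact List.mem_filter.mpr ⟨hp, by simpa using hpne⟩)
      show specS (cyc cursor alive).length (cyc cursor alive) loc order = altLevels ks' g c' o' loc
      rw [← step]
      exact LS

-- ---- the groups dictionary ----
theorem groups_getD (L : List (Int × Int)) : ∀ (d : PySem.Dict Int (List Int)) (k : Int),
    (L.foldl (fun d e => d.modify e.2 [] (fun l => l ++ [e.1])) d).getD k [] =
      d.getD k [] ++ (L.filter (fun e => decide (e.2 = k))).map (·.1) := by
  induction L with
  | nil => intro d k; simp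
  | cons e t ih =>
    intro d k
    rw [List.foldl_cons, ih, PySem.Dict.getD_modify]
    by_cases hk : k = e.2
    · subst hk
      rw [if_pos rfl, List.filter_cons_of_pos (by simp), List.map_cons, List.append_assoc,
        List.singleton_append]
    · rw [if_neg hk, List.filter_cons_of_neg (by simp; intro h; exact hk h.symm)]

theorem groups_keys_mem (L : List (Int × Int)) : ∀ (d : PySem.Dict Int (List Int)) (k : Int),
    (k ∈ (L.foldl (fun d e => d.modify e.2 [] (fun l => l ++ [e.1])) d).keys ↔ k ∈ d.keys ∨ k ∈ L.map (·.2)) := by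
  induction L with
  | nil => intro d k; simp
  | cons e t ih =>
    intro d k
    rw [List.foldl_cons, ih]
    rw [← PySem.Dict.contains_iff_mem_keys, PySem.Dict.contains_modify,
      ← PySem.Dict.contains_iff_mem_keys (d := d)]
    simp only [List.map_cons, List.mem_cons, Bool.or_eq_true, beq_iff_eq]
    constructor
    · rintro ((h | h) | h)
      · exact Or.inr (Or.inl h)
      · exact Or.inl h
      · exact Or.inr (Or.inr h)
    · rintro (h | (h | h))
      · exact Or.inl (Or.inr h)
      · exact Or.inl (Or.inl h)
      · exact Or.inr h

-- ===== VERDICT (by name: the statement is the Claim_ definition above) =====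
theorem solution_spec : Claim_equal_solution := by
  unfold Claim_equal_solution
  intro ps loc _ hpre
  unfold Spec_solution solution solution_alt
  simp only []
  set q := PySem.List.enumerate ps with hq
  have hqlen : q.length = ps.length := PySem.List.length_enumerate ..
  have hqsnd : q.map (·.2) = ps := PySem.List.map_snd_enumerate ..
  have hqasc : q.Pairwise (fun a b => a.1 < b.1) := PySem.List.pairwise_lt_enumerate ..
  have hmemq : ∀ e ∈ q, e.2 ∈ ps := by
    intro e he
    rw [← hqsnd]
    exact List.mem_map_of_mem he
  -- the invariant from the precondition
  have hlocmem : (0 ≤ loc ∧ loc.toNat < ps.length ∧ 0 ≤ ps.getD loc.toNat 0) →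
      ∃ p, (loc, p) ∈ q ∧ 0 ≤ p := by
    rintro ⟨h0, hlt, hnn⟩
    refine ⟨ps[loc.toNat], ?_, ?_⟩
    · apply (PySem.List.mem_enumerate_iff ..).mpr
      exact ⟨loc.toNat, hlt, by simp [h0, Int.toNat_of_nonneg]⟩
    · rwa [List.getD_eq_getElem ps 0 hlt] at hnn
  have hinvA : invA loc q := by
    rcases hpre with hall | hloc
    · exact Or.inl fun e he => hall e.2 (hmemq e he)
    · exact Or.inr (hlocmem hloc)
  -- A's loop reaches specS
  have hfuel : q.length * q.length + distMax q ≤ (q.length + 1) * (q.length + 1) := by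
    have h1 : distMax q ≤ q.length := (List.takeWhile_sublist _).length_le
    nlinarith
  have hA := loop_eq_specS loc ((q.length + 1) * (q.length + 1)) q 0 hinvA hfuel
  rw [hA]
  -- B's walk over the levels
  set groups := q.foldl (fun d e => d.modify e.2 [] (fun l => l ++ [e.1])) PySem.Dict.empty with hg
  set ks := PySem.List.sorted groups.keys (fun k => k) true with hks
  have hkeysmem : ∀ k : Int, k ∈ groups.keys ↔ k ∈ ps := by
    intro k
    rw [hg, groups_keys_mem q PySem.Dict.empty k, PySem.Dict.keys_empty]
    simp [hqsnd]
  have hnodupk : groups.keys.Nodup := by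
    rw [hg]
    exact PySem.Dict.nodup_keys_foldl_modify_key _ _ _ _ _ PySem.Dict.nodup_keys_empty
  have hmemks : ∀ k : Int, k ∈ ks ↔ k ∈ ps := by
    intro k
    rw [hks, PySem.List.mem_sorted]
    exact hkeysmem k
  have hksdesc : ks.Pairwise (· > ·) := by
    have h1 : ks.Pairwise (fun a b => b ≤ a) := PySem.List.sorted_pairwise_rev ..
    have h2 : ks.Nodup := ((PySem.List.sorted_perm ..).nodup_iff).mpr hnodupk
    exact (h1.and h2).imp fun h => by
      obtain ⟨hle, hne⟩ := h
      exact lt_of_le_of_ne hle (fun heq => hne heq.symm)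
  have hgroups : ∀ k ∈ ks, groups.getD k [] = (q.filter (fun e => decide (e.2 = k))).map (·.1) := by
    intro k _
    rw [hg, groups_getD q PySem.Dict.empty k, PySem.Dict.getD_empty, List.nil_append]
  have hcyc0 : cyc 0 q = q := by
    unfold cyc
    have h1 : q.filter (fun e => decide ((0:Int) ≤ e.1)) = q := by
      apply List.filter_eq_self.mpr
      intro x hx
      obtain ⟨k, hk, hxeq⟩ := (PySem.List.mem_enumerate_iff ..).mp hx
      simp [hxeq]
    have h2 : q.filter (fun e => decide (e.1 < (0:Int))) = [] := by
      apply List.filter_eq_nil_iff.mpr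
      intro x hx
      obtain ⟨k, hk, hxeq⟩ := (PySem.List.mem_enumerate_iff ..).mp hx
      simp [hxeq]
    rw [h1, h2, List.append_nil]
  have hB := levels_eq loc groups ks q 0 0 hksdesc
    (fun e he => (hmemks e.2).mpr (hmemq e he))
    (by
      intro k hk
      obtain ⟨e, he, hesnd⟩ := List.mem_map.mp (hqsnd ▸ (hmemks k).mp hk)
      exact ⟨e, he, hesnd⟩)
    hqasc hgroups
    (by
      rcases hpre with hall | hloc
      · exact Or.inl fun k hk => hall k ((hmemks k).mp hk)
      · exact Or.inr (hlocmem hloc))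
  rw [hcyc0] at hB
  exact hB
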